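-- pv_equiv track=rewrite | github.com/bio-ontology-research-group/hapli | hapli/interpretation/esm_scoring.py | sequences_differ_only_at
-- ===== SOURCE A (Python) =====
-- from typing import Iterable, Sequence
--
-- def sequences_differ_only_at(
--     ref: str, hap: str, positions: Iterable[int]
-- ) -> bool:
--     """Sanity check: return True iff ref and hap agree at every position EXCEPT
--     the (1-based) `positions`. Used by the epistasis module to verify that its
--     additive/joint decomposition only touches substitution positions.
--     """
--     if len(ref) != len(hap):
--         return False
--     positions = set(positions)
--     for i in range(1, len(ref) + 1):
--         if i in positions:
--             continue
--         if ref[i - 1] != hap[i - 1]: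
--             return False
--     return True
-- ===== SOURCE B (Python) =====
-- def sequences_differ_only_at(ref, hap, positions):
--     if len(ref) != len(hap):
--         return False
--     diff = {i + 1 for i, (a, b) in enumerate(zip(ref, hap)) if a != b}
--     return diff <= set(positions)
-- ===== Notes on version B (the rewrite author's own statement) =====
-- stated objective: simpler
-- what changed: Replaces the index loop with per-element membership tests and early return by computing the set of differing 1-based positions from zip/enumerate and returning a single subset comparison against set(positions).
import Mathlib
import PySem

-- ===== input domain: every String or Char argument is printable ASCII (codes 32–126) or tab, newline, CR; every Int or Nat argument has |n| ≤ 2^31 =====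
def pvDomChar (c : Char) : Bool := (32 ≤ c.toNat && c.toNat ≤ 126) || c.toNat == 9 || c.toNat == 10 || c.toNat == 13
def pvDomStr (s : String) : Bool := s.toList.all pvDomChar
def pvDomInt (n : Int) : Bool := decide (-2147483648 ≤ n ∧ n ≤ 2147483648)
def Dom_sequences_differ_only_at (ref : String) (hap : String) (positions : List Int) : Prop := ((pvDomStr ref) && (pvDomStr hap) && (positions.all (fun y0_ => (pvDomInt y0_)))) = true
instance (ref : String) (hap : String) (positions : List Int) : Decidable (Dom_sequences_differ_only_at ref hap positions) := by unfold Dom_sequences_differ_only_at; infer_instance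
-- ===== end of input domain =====

-- B replaces A's per-index loop (membership test + early return) with one subset
-- comparison: the set of 1-based differing positions vs set(positions). Simpler
-- decomposition, same behaviour; not claimed faster.

-- ===== PORT A =====
-- the 'for i in range(1, len(ref)+1)' loop with its early 'return False'
def pvLoopA (r h : List Char) (pos : PySem.Set Int) : List Int → Bool
  | [] => true
  | i :: rest =>
    if PySem.Set.contains pos i then pvLoopA r h pos rest
    else if PySem.List.pyGet? r (i - 1) ≠ PySem.List.pyGet? h (i - 1) then false
    else pvLoopA r h pos rest

def sequences_differ_only_at (ref : String) (hap : String) (positions : List Int) : Bool :=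
  if PySem.Str.len ref ≠ PySem.Str.len hap then false
  else
    pvLoopA ref.toList hap.toList (PySem.Set.ofList positions)
      (PySem.List.pyRange 1 (PySem.Str.len ref + 1))

-- ===== PORT B =====
def sequences_differ_only_at_alt (ref : String) (hap : String) (positions : List Int) : Bool :=
  if PySem.Str.len ref ≠ PySem.Str.len hap then false
  else
    let diff := PySem.Set.ofList
      ((PySem.List.enumerate (ref.toList.zip hap.toList)).filterMap
        (fun p => if p.2.1 ≠ p.2.2 then some (p.1 + 1) else none))
    PySem.Set.issubset diff (PySem.Set.ofList positions)

-- ===== PRECONDITION & SPEC =====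
def Spec_sequences_differ_only_at (ref : String) (hap : String) (positions : List Int) (out : Bool) : Prop := out = sequences_differ_only_at_alt ref hap positions
instance (ref : String) (hap : String) (positions : List Int) (out : Bool) : Decidable (Spec_sequences_differ_only_at ref hap positions out) := by unfold Spec_sequences_differ_only_at; infer_instance

-- ===== CLAIM (what is proved, stated in full; the proofs are below) =====
def Claim_equal_sequences_differ_only_at : Prop := ∀ (ref : String) (hap : String) (positions : List Int), Dom_sequences_differ_only_at ref hap positions → Spec_sequences_differ_only_at ref hap positions (sequences_differ_only_at ref hap positions)

-- ===== LEMMAS AND PROOFS =====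

-- A's loop is the conjunction, over the index list, of "excepted or equal here"
theorem pvLoopA_eq_all (r h : List Char) (pos : PySem.Set Int) (l : List Int) :
    pvLoopA r h pos l
      = l.all (fun i => PySem.Set.contains pos i
          || (PySem.List.pyGet? r (i - 1) == PySem.List.pyGet? h (i - 1))) := by
  induction l with
  | nil => rfl
  | cons i rest ih =>
    by_cases hc : i ∈ pos
    · simp [pvLoopA, hc, ih]
    · by_cases hne : PySem.List.pyGet? r (i - 1) = PySem.List.pyGet? h (i - 1)
      · simp [pvLoopA, hc, hne, ih]
      · simp [pvLoopA, hc, hne]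

-- all over a deduplicated list is all over the original
theorem ofList_all (s : List Int) (p : Int → Bool) : (PySem.Set.ofList s).all p = s.all p := by
  rw [Bool.eq_iff_iff]; simp only [List.all_eq_true]
  exact ⟨fun h x hx => h x ((PySem.Set.mem_ofList s x).2 hx),
         fun h x hx => h x ((PySem.Set.mem_ofList s x).1 hx)⟩

-- the heart: A's per-index check over 1..n equals B's subset test, for equal lengths
theorem pv_bridge (r h : List Char) (P : List Int) (hlen : r.length = h.length) :
    (PySem.List.pyRange 1 ((r.length : Int) + 1)).all
        (fun i => PySem.Set.contains (PySem.Set.ofList P) i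
          || (PySem.List.pyGet? r (i - 1) == PySem.List.pyGet? h (i - 1)))
      = PySem.Set.issubset
          (PySem.Set.ofList ((PySem.List.enumerate (r.zip h)).filterMap
            (fun p => if p.2.1 ≠ p.2.2 then some (p.1 + 1) else none)))
          (PySem.Set.ofList P) := by
  show _ = ((PySem.Set.ofList _).all fun x => (PySem.Set.ofList P).contains x)
  rw [ofList_all, Bool.eq_iff_iff]
  simp only [List.all_eq_true, PySem.List.mem_pyRange_one, List.mem_filterMap,
    PySem.List.mem_enumerate_iff]
  constructor
  · rintro H y ⟨p, hp, hf⟩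
    obtain ⟨k, hk, hpa⟩ := hp
    rw [hpa] at hf
    simp at hf
    simp only [List.length_zip, hlen, Nat.min_self] at hk
    obtain ⟨hne, hy⟩ := hf
    have := H (↑k + 1) ⟨by omega, by omega⟩
    have hgr : PySem.List.pyGet? r ((↑k : Int) + 1 - 1) = some (r[k]'(by omega)) := by
      have : ((↑k : Int) + 1 - 1) = (k : Int) := by ring
      rw [this, PySem.List.pyGet?_natCast]
      simp [List.getElem?_eq_getElem (by omega : k < r.length)]
    have hgh : PySem.List.pyGet? h ((↑k : Int) + 1 - 1) = some (h[k]'(by omega)) := by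
      have : ((↑k : Int) + 1 - 1) = (k : Int) := by ring
      rw [this, PySem.List.pyGet?_natCast]
      simp [List.getElem?_eq_getElem (by omega : k < h.length)]
    rw [hgr, hgh] at this
    rcases Bool.or_eq_true_iff.1 this with hc | hc
    · exact hy ▸ hc
    · exact absurd (Option.some.inj (beq_iff_eq.1 hc)) hne
  · intro H x hx
    set k : Nat := (x - 1).toNat with hkdef
    have hkx : (k : Int) = x - 1 := by omega
    have hklt : k < r.length := by omega
    by_cases heq : r[k]'(by omega) = h[k]'(by omega)
    · apply Bool.or_eq_true_iff.2; right
      have : (x - 1) = (k : Int) := by omega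
      rw [this, PySem.List.pyGet?_natCast]
      simp [List.getElem?_eq_getElem hklt, List.getElem?_eq_getElem (show k < h.length by omega), heq]
    · apply Bool.or_eq_true_iff.2; left
      apply H x
      refine ⟨((k : Int), (r[k]'(by omega), h[k]'(by omega))), ⟨k, by simp [List.length_zip, hlen]; omega, ?_⟩, ?_⟩
      · simp [List.getElem_zip]
      · simp only [ne_eq, ite_not]
        simp [heq]
        omega

-- ===== VERDICT (by name: the statement is the Claim_ definition above) =====
theorem sequences_differ_only_at_spec : Claim_equal_sequences_differ_only_at := by
  intro ref hap positions _
  unfold Spec_sequences_differ_only_at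
  unfold sequences_differ_only_at sequences_differ_only_at_alt
  by_cases hlen : PySem.Str.len ref = PySem.Str.len hap
  · have hlen' : ref.toList.length = hap.toList.length := by
      simpa [PySem.Str.len] using hlen
    rw [if_neg (by simp [hlen']), if_neg (by simp [hlen'])]
    rw [pvLoopA_eq_all]
    have := pv_bridge ref.toList hap.toList positions hlen'
    simpa [PySem.Str.len] using this
  · rw [if_pos (by simpa using hlen), if_pos (by simpa using hlen)]
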